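-- pv_equiv track=rewrite | github.com/vism2889/code_dump | CMU_15-112/hw4.py | wordInHand
-- ===== SOURCE A (Python) =====
-- def wordInHand(word, hand):
--     count = 0
--     letters = ''
--     for letter in word:
--         if letter in hand and letters.count(letter) != hand.count(letter):
--             count += 1
--             letters += letter
--     if count == len(word):
--         return True
--     else:
--         return False
-- ===== SOURCE B (Python) =====
-- def wordInHand(word, hand):
--     remaining = list(hand)
--     for letter in word:
--         if letter in remaining:
--             remaining.remove(letter)
--         else:
--             return False
--     return True
-- ===== Notes on version B (the rewrite author's own statement) =====
-- stated objective: simpler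
-- what changed: B consumes letters from a mutable copy of hand and returns False at the first missing letter, instead of A's count-accepted-letters-then-compare-to-len(word) scan that repeatedly re-counts occurrences in the growing 'letters' string and in hand.
import Mathlib
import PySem

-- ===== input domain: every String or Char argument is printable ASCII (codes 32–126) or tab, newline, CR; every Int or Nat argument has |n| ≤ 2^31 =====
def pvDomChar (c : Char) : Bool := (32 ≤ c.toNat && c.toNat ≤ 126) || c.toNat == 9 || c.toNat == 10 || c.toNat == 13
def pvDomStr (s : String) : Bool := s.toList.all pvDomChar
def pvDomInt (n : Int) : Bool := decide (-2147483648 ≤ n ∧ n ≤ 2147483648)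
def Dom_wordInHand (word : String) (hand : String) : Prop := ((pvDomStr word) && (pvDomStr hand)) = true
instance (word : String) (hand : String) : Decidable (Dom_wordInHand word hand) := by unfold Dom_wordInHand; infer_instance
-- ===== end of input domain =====

-- B replaces A's count-accepted-letters-then-compare scan by a consume-from-a-copy-of-hand
-- loop with early return; equal return values on all inputs (objective: simpler).

-- ===== PORT A =====
-- A's loop over word: state (count, letters); `letter in hand` on strings with a 1-char
-- needle is char membership, `s.count(c)` for a 1-char needle is List.count — both exact.
def pvALoop (hand : List Char) : List Char → Nat × List Char → Nat × List Char
  | [], st => st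
  | c :: cs, (count, letters) =>
    if c ∈ hand ∧ letters.count c ≠ hand.count c then
      pvALoop hand cs (count + 1, letters ++ [c])
    else
      pvALoop hand cs (count, letters)

def wordInHand (word : String) (hand : String) : Bool :=
  decide ((pvALoop hand.toList word.toList (0, [])).1 = word.toList.length)

-- ===== PORT B =====
-- B's loop: `remaining.remove(letter)` removes the first occurrence = List.erase (exact).
def pvBLoop : List Char → List Char → Bool
  | [], _ => true
  | c :: cs, remaining =>
    if c ∈ remaining then pvBLoop cs (remaining.erase c) else false

def wordInHand_alt (word : String) (hand : String) : Bool :=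
  pvBLoop word.toList hand.toList

-- ===== PRECONDITION & SPEC =====
def Spec_wordInHand (word : String) (hand : String) (out : Bool) : Prop := out = wordInHand_alt word hand
instance (word : String) (hand : String) (out : Bool) : Decidable (Spec_wordInHand word hand out) := by unfold Spec_wordInHand; infer_instance

-- ===== CLAIM (what is proved, stated in full; the proofs are below) =====
def Claim_equal_wordInHand : Prop := ∀ (word : String) (hand : String), Dom_wordInHand word hand → Spec_wordInHand word hand (wordInHand word hand)

-- ===== LEMMAS AND PROOFS =====

-- A's count grows by at most one per character.
theorem pvALoop_le (hand : List Char) (cs : List Char) :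
    ∀ n letters, (pvALoop hand cs (n, letters)).1 ≤ n + cs.length := by
  induction cs with
  | nil => intro n letters; simp [pvALoop]
  | cons c cs ih =>
    intro n letters
    simp only [pvALoop]
    split
    · have := ih (n + 1) (letters ++ [c]); simp [List.length_cons]; omega
    · have := ih n letters; simp [List.length_cons]; omega

-- Main invariant: with count = letters.length, letters multiset-contained in hand,
-- and remaining = hand minus letters (as counts), A's "all of cs accepted" test
-- coincides with B's loop.
theorem pvLoop_equiv (hand : List Char) (cs : List Char) :
    ∀ (letters remaining : List Char),
      (∀ c, letters.count c ≤ hand.count c) →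
      (∀ c, remaining.count c + letters.count c = hand.count c) →
      (decide ((pvALoop hand cs (letters.length, letters)).1 = letters.length + cs.length)
        = pvBLoop cs remaining) := by
  induction cs with
  | nil => intro letters remaining _ _; simp [pvALoop, pvBLoop]
  | cons c cs ih =>
    intro letters remaining hle hr
    by_cases hc : c ∈ hand ∧ letters.count c ≠ hand.count c
    · have hlt : letters.count c < hand.count c := lt_of_le_of_ne (hle c) hc.2
      have hmem : c ∈ remaining := by
        have := hr c
        exact List.count_pos_iff.1 (by omega)
      have hle' : ∀ d, (letters ++ [c]).count d ≤ hand.count d := by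
        intro d
        have := hle d
        by_cases hd : d = c
        · subst hd; simp [List.count_append]; omega
        · simp [List.count_append, List.count_singleton]
          rw [if_neg (Ne.symm hd)]; omega
      have hr' : ∀ d, (remaining.erase c).count d + (letters ++ [c]).count d = hand.count d := by
        intro d
        have := hr d
        by_cases hd : d = c
        · subst hd
          rw [List.count_erase_self]
          simp [List.count_append]
          omega
        · rw [List.count_erase_of_ne hd]
          simp [List.count_append, List.count_singleton]
          rw [if_neg (Ne.symm hd)]; omega
      have := ih (letters ++ [c]) (remaining.erase c) hle' hr'
      simp only [pvALoop, if_pos hc, pvBLoop, if_pos hmem]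
      have harith : (letters ++ [c]).length + cs.length = letters.length + (c :: cs).length := by
        simp [List.length_append]; omega
      rw [← harith]
      simpa [List.length_append] using this
    · have hnot : c ∉ remaining := by
        intro hmem
        have hpos : 0 < remaining.count c := List.count_pos_iff.2 hmem
        have := hr c
        by_cases hch : c ∈ hand
        · have : letters.count c = hand.count c := by
            by_contra hne; exact hc ⟨hch, hne⟩
          omega
        · have : hand.count c = 0 := List.count_eq_zero.2 hch
          omega
      simp only [pvALoop, if_neg hc, pvBLoop, if_neg hnot]
      have := pvALoop_le hand cs letters.length letters
      simp only [List.length_cons]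
      rw [decide_eq_false]
      omega

-- ===== VERDICT (by name: the statement is the Claim_ definition above) =====
theorem wordInHand_spec : Claim_equal_wordInHand := by
  intro word hand _
  unfold Spec_wordInHand wordInHand wordInHand_alt
  have := pvLoop_equiv hand.toList word.toList [] hand.toList
    (by intro c; simp) (by intro c; simp)
  simpa using this
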